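-- pv_equiv track=rewrite | github.com/Nghia03092004/nghia03092004.github.io | project_euler_unified/problem_432/solution.py | solve
-- ===== SOURCE A (Python) =====
-- def solve(N=10000):
--     """Sum of totient chain lengths for n = 2..N."""
--     # Compute phi using sieve
--     phi = list(range(N + 1))
--     for p in range(2, N + 1):
--         if phi[p] == p:  # p is prime
--             for k in range(p, N + 1, p):
--                 phi[k] -= phi[k] // p
--
--     # Compute f(n) = steps to reach 1
--     f = [0] * (N + 1)
--     for n in range(2, N + 1):
--         f[n] = 1 + f[phi[n]]
--
--     return sum(f[2:])
-- ===== SOURCE B (Python) =====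
-- def solve(N=10000):
--     """Sum of totient chain lengths for n = 2..N."""
--     # Same totient sieve as the reference.
--     phi = list(range(N + 1))
--     for p in range(2, N + 1):
--         if phi[p] == p:  # p is prime
--             for k in range(p, N + 1, p):
--                 phi[k] -= phi[k] // p
--
--     # No memo table: walk each totient chain directly, accumulating its
--     # length into a running total.
--     total = 0
--     for n in range(2, N + 1):
--         m = n
--         while m > 1:
--             m = phi[m]
--             total += 1
--     return total
-- ===== Notes on version B (the rewrite author's own statement) =====
-- stated objective: alternative
-- what changed: The memoized DP array f (f[n] = 1 + f[phi[n]], then summed) is replaced by a direct per-n walk of the totient chain (while m > 1: m = phi[m]), accumulating chain lengths into a running total with no f array.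
import Mathlib
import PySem

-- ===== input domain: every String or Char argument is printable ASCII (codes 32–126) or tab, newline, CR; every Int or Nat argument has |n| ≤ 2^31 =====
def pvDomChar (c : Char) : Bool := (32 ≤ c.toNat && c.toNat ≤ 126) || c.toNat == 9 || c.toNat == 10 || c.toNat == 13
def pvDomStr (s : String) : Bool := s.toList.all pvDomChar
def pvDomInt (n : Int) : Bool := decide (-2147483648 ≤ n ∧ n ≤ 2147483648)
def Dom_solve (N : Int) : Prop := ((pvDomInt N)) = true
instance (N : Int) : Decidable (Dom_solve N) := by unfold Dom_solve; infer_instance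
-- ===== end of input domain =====

-- B replaces A's memoized DP array f by an independent per-n walk of each totient chain,
-- accumulating chain lengths into a running total (objective: alternative decomposition).

-- ===== PORT A =====
-- Both Python sources contain the identical totient-sieve lines verbatim; the sieve
-- helpers below are that shared transliteration, used by both ports.
def sieveInnerStep (p : Int) (a : List Int) (k : Int) : List Int :=
  PySem.List.pySetD a k
    (PySem.List.pyGetD a k 0 - PySem.Int.floordiv (PySem.List.pyGetD a k 0) p)

def sieveOuterStep (N : Int) (phi : List Int) (p : Int) : List Int :=
  if PySem.List.pyGetD phi p 0 = p then
    (PySem.List.pyRange p (N + 1) p).foldl (sieveInnerStep p) phi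
  else phi

def totSieve (N : Int) : List Int :=
  (PySem.List.pyRange 2 (N + 1) 1).foldl (sieveOuterStep N)
    (PySem.List.pyRange 0 (N + 1) 1)

def fStep (phi : List Int) (f : List Int) (n : Int) : List Int :=
  PySem.List.pySetD f n (1 + PySem.List.pyGetD f (PySem.List.pyGetD phi n 0) 0)

-- f[n] = 1 + f[phi[n]]; return sum(f[2:])
def solve (N : Int) : Int :=
  let phi := totSieve N
  let f := (PySem.List.pyRange 2 (N + 1) 1).foldl (fStep phi)
    (List.replicate (N + 1).toNat 0)
  (PySem.List.slice f (some 2) none).sum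


-- ===== PORT B =====
-- 'm = n; while m > 1: m = phi[m]; total += 1'.  Fuel m.toNat suffices: the sieve
-- output satisfies phi[m] < m for m ≥ 2 (proved below), so the walk needs < m steps.
def chainAdd (phi : List Int) : Nat → Int → Int → Int
  | 0, _, tot => tot
  | fuel + 1, m, tot =>
    if 1 < m then chainAdd phi fuel (PySem.List.pyGetD phi m 0) (tot + 1) else tot

def solve_alt (N : Int) : Int :=
  let phi := totSieve N
  (PySem.List.pyRange 2 (N + 1) 1).foldl (fun tot n => chainAdd phi n.toNat n tot) 0


-- ===== PRECONDITION & SPEC =====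
def Spec_solve (N : Int) (out : Int) : Prop := out = solve_alt N
instance (N : Int) (out : Int) : Decidable (Spec_solve N out) := by unfold Spec_solve; infer_instance

-- ===== CLAIM (what is proved, stated in full; the proofs are below) =====
def Claim_equal_solve : Prop := ∀ (N : Int), Dom_solve N → Spec_solve N (solve N)

-- ===== LEMMAS AND PROOFS =====

lemma pv_getD_set (a : List Int) (k j : Nat) (v : Int) :
    (a.set k v).getD j 0 = if k = j ∧ j < a.length then v else a.getD j 0 := by
  simp only [List.getD_eq_getElem?_getD, List.getElem?_set]
  by_cases h1 : k = j
  · subst h1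
    by_cases h2 : k < a.length <;> simp [h2]
  · simp [h1]

lemma pv_pyRange_pos_cons (a b s : Int) (hs : 0 < s) (h : a < b) :
    PySem.List.pyRange a b s = a :: PySem.List.pyRange (a + s) b s := by
  have hs' : ¬ (s = 0) := by omega
  have hm0 : 0 ≤ (b - a - 1) / s := Int.ediv_nonneg (by omega) (by omega)
  have hcount : b - a + s - 1 = (b - a - 1) + 1 * s := by ring
  by_cases h2 : a + s < b
  · simp only [PySem.List.pyRange, hs', if_false, if_pos hs, if_pos h, if_pos h2]
    have e1 : (b - a + s - 1) / s = (b - a - 1) / s + 1 := by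
      rw [hcount, Int.add_mul_ediv_right _ _ (by omega : s ≠ 0)]
    have e2 : b - (a + s) + s - 1 = b - a - 1 := by ring
    rw [e1, e2]
    have e3 : ((b - a - 1) / s + 1).toNat = ((b - a - 1) / s).toNat + 1 := by omega
    rw [e3, List.range_succ_eq_map]
    simp [List.map_map, Function.comp]
    intro k _
    ring
  · simp only [PySem.List.pyRange, hs', if_false, if_pos hs, if_pos h, if_neg h2]
    have hlt : b - a - 1 < s := by omega
    have e1 : (b - a + s - 1) / s = 1 := by
      rw [hcount, Int.add_mul_ediv_right _ _ (by omega : s ≠ 0)]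
      rw [Int.ediv_eq_zero_of_lt (by omega) hlt]
      norm_num
    rw [e1]
    simp

lemma pv_sub_floordiv (x p : Int) (hx : 1 ≤ x) (hp : 2 ≤ p) :
    1 ≤ x - PySem.Int.floordiv x p ∧ x - PySem.Int.floordiv x p ≤ x := by
  have h := (PySem.Int.floordiv_eq_iff_of_pos (a := x) (b := p)
    (q := PySem.Int.floordiv x p) (by omega)).mp rfl
  set q := PySem.Int.floordiv x p with hq
  have hq0 : 0 ≤ q := by nlinarith [h.1, h.2]
  have hqx : q < x := by nlinarith [h.1, h.2]
  omega

lemma pv_innerStep_eq (p k : Int) (hk : 0 ≤ k) (a : List Int) :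
    sieveInnerStep p a k =
      a.set k.toNat (a.getD k.toNat 0 - PySem.Int.floordiv (a.getD k.toNat 0) p) := by
  simp [sieveInnerStep, PySem.List.pySetD_of_nonneg _ _ hk, PySem.List.pyGetD_of_nonneg _ _ hk]

lemma pv_inner_fold (p : Int) (hp : 2 ≤ p) (l : List Int) (hl : ∀ k ∈ l, 2 ≤ k)
    (a : List Int) (h1 : ∀ j : Nat, j < a.length → 1 ≤ j → 1 ≤ a.getD j 0) :
    (l.foldl (sieveInnerStep p) a).length = a.length ∧
    (∀ j : Nat, j < a.length → 1 ≤ j → 1 ≤ (l.foldl (sieveInnerStep p) a).getD j 0) ∧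
    (∀ j : Nat, j < a.length → (l.foldl (sieveInnerStep p) a).getD j 0 ≤ a.getD j 0) := by
  induction l generalizing a with
  | nil => exact ⟨rfl, h1, fun j _ => le_refl _⟩
  | cons k rest ih =>
    have hk : 2 ≤ k := hl k (by simp)
    have hk0 : (0:Int) ≤ k := by omega
    have hstep := pv_innerStep_eq p k hk0 a
    set x := a.getD k.toNat 0 with hx
    have hlen' : (sieveInnerStep p a k).length = a.length := by
      rw [hstep]; simp
    have hget : ∀ j : Nat, (sieveInnerStep p a k).getD j 0 =
        if k.toNat = j ∧ j < a.length then x - PySem.Int.floordiv x p else a.getD j 0 := by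
      intro j; rw [hstep, pv_getD_set]
    have hk1 : 1 ≤ k.toNat := by omega
    have h1' : ∀ j : Nat, j < (sieveInnerStep p a k).length → 1 ≤ j →
        1 ≤ (sieveInnerStep p a k).getD j 0 := by
      intro j hj hj1
      rw [hlen'] at hj
      rw [hget]
      split_ifs with hc
      · exact (pv_sub_floordiv x p (h1 k.toNat (hc.1 ▸ hj) hk1) hp).1
      · exact h1 j hj hj1
    have hmain := ih (fun k hk => hl k (by simp [hk])) (sieveInnerStep p a k) h1'
    refine ⟨?_, ?_, ?_⟩
    · simpa [hlen'] using hmain.1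
    · intro j hj hj1
      exact hmain.2.1 j (by omega : j < (sieveInnerStep p a k).length) hj1
    · intro j hj
      have h3 := hmain.2.2 j (by omega : j < (sieveInnerStep p a k).length)
      refine le_trans h3 ?_
      rw [hget]
      split_ifs with hc
      · rcases hc with ⟨hc1, _⟩
        subst hc1
        exact (pv_sub_floordiv x p (h1 k.toNat hj hk1) hp).2
      · exact le_refl _
def SInv (L : Nat) (t : Int) (a : List Int) : Prop :=
  a.length = L ∧ ∀ j : Nat, j < L →
    (1 ≤ j → 1 ≤ a.getD j 0) ∧ a.getD j 0 ≤ (j : Int) ∧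
    (2 ≤ (j : Int) → (j : Int) < t → a.getD j 0 < (j : Int))

lemma pv_floordiv_self (t : Int) (ht : 2 ≤ t) : PySem.Int.floordiv t t = 1 := by
  rw [PySem.Int.floordiv_eq_iff_of_pos (by omega)]
  constructor <;> nlinarith

lemma pv_outer (N : Int) (hN : 1 ≤ N) : ∀ t : Int, 2 ≤ t → t ≤ N + 1 →
    SInv (N + 1).toNat t
      ((PySem.List.pyRange 2 t 1).foldl (sieveOuterStep N) (PySem.List.pyRange 0 (N + 1) 1)) := by
  intro t h2
  induction t, h2 using Int.le_induction with
  | base =>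
    intro _
    rw [PySem.List.pyRange_one_eq_nil (le_refl 2)]
    simp only [List.foldl_nil]
    refine ⟨by simp [PySem.List.length_pyRange_one], ?_⟩
    intro j hj
    have hval : (PySem.List.pyRange 0 (N + 1) 1).getD j 0 = (j : Int) := by
      rw [List.getD_eq_getElem _ _ (by simp [PySem.List.length_pyRange_one]; omega)]
      rw [PySem.List.getElem_pyRange_one]
      omega
    rw [hval]
    refine ⟨by intro h; exact_mod_cast Nat.one_le_cast.mpr h, le_refl _, by omega⟩
  | succ t h2t ih =>
    intro ht1
    have htN : t ≤ N := by omega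
    rw [PySem.List.pyRange_one_succ_right (by omega : (2:Int) ≤ t), List.foldl_append]
    set a := (PySem.List.pyRange 2 t 1).foldl (sieveOuterStep N) (PySem.List.pyRange 0 (N + 1) 1)
      with ha
    have hInv : SInv (N + 1).toNat t a := ih (by omega)
    obtain ⟨hlen, hvals⟩ := hInv
    have ht0 : (0:Int) ≤ t := by omega
    have htL : t.toNat < (N + 1).toNat := by omega
    have htLa : t.toNat < a.length := by omega
    have hgetat : PySem.List.pyGetD a t 0 = a.getD t.toNat 0 :=
      PySem.List.pyGetD_of_nonneg _ _ ht0
    simp only [List.foldl_cons, List.foldl_nil, sieveOuterStep, hgetat]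
    by_cases hcase : a.getD t.toNat 0 = t
    · rw [if_pos hcase]
      rw [pv_pyRange_pos_cons t (N + 1) t (by omega) (by omega)]
      rw [List.foldl_cons]
      have hstep := pv_innerStep_eq t t ht0 a
      have hv : a.getD t.toNat 0 - PySem.Int.floordiv (a.getD t.toNat 0) t = t - 1 := by
        rw [hcase, pv_floordiv_self t h2t]
      rw [hv] at hstep
      -- a' := a.set t.toNat (t - 1)
      have hlen' : (sieveInnerStep t a t).length = a.length := by rw [hstep]; simp
      have hget' : ∀ j : Nat, (sieveInnerStep t a t).getD j 0 =
          if t.toNat = j ∧ j < a.length then t - 1 else a.getD j 0 := by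
        intro j; rw [hstep, pv_getD_set]
      have h1' : ∀ j : Nat, j < (sieveInnerStep t a t).length → 1 ≤ j →
          1 ≤ (sieveInnerStep t a t).getD j 0 := by
        intro j hj hj1
        rw [hget']
        split_ifs with hc
        · omega
        · exact ((hvals j (by omega)).1) hj1
      have hrest := pv_inner_fold t h2t (PySem.List.pyRange (t + t) (N + 1) t)
        (by
          intro k hk
          have := (PySem.List.mem_pyRange_iff_of_pos (by omega : (0:Int) < t) k).mp hk
          omega)
        (sieveInnerStep t a t) h1'
      set b := (PySem.List.pyRange (t + t) (N + 1) t).foldl (sieveInnerStep t)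
        (sieveInnerStep t a t) with hb
      refine ⟨by omega, ?_⟩
      intro j hj
      have hjb : j < (sieveInnerStep t a t).length := by omega
      have hlow := hrest.2.1 j hjb
      have hmono := hrest.2.2 j hjb
      rw [hget'] at hmono
      refine ⟨hlow, ?_, ?_⟩
      · -- b_j ≤ j
        split_ifs at hmono with hc
        · have : (j : Int) = t := by omega
          omega
        · exact le_trans hmono (hvals j hj).2.1
      · intro hj2 hjt1
        split_ifs at hmono with hc
        · have : (j : Int) = t := by omega
          omega
        · by_cases hjt : (j : Int) < t
          · exact lt_of_le_of_lt hmono ((hvals j hj).2.2 hj2 hjt)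
          · -- (j:Int) = t, but hc fails → contradiction (t.toNat = j, j < a.length)
            exfalso
            apply hc
            constructor <;> omega
    · rw [if_neg hcase]
      refine ⟨hlen, ?_⟩
      intro j hj
      refine ⟨(hvals j hj).1, (hvals j hj).2.1, ?_⟩
      intro hj2 hjt1
      by_cases hjt : (j : Int) < t
      · exact (hvals j hj).2.2 hj2 hjt
      · have hjeq : j = t.toNat := by omega
        have := (hvals j hj).2.1
        subst hjeq
        have hne : a.getD t.toNat 0 ≠ t := hcase
        omega
lemma pv_chainAdd_stop (φ : List Int) (fuel : Nat) (m tot : Int) (h : ¬ 1 < m) :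
    chainAdd φ fuel m tot = tot := by
  cases fuel <;> simp [chainAdd, h]

lemma pv_chainAdd_acc (φ : List Int) :
    ∀ (fuel : Nat) (m tot : Int), chainAdd φ fuel m tot = tot + chainAdd φ fuel m 0 := by
  intro fuel
  induction fuel with
  | zero => intro m tot; simp [chainAdd]
  | succ f ih =>
    intro m tot
    by_cases h : 1 < m
    · simp only [chainAdd, if_pos h]
      rw [ih _ (tot + 1), ih _ (0 + 1)]
      ring
    · simp [chainAdd, h]

lemma pv_chainAdd_fuel (φ : List Int) (N : Int)
    (hφlen : φ.length = (N + 1).toNat)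
    (hlow : ∀ j : Nat, j < φ.length → 1 ≤ j → 1 ≤ φ.getD j 0)
    (hstrict : ∀ j : Nat, j < φ.length → 2 ≤ (j : Int) → φ.getD j 0 < (j : Int)) :
    ∀ (k : Nat) (m : Int), m.toNat = k → 0 ≤ m → m ≤ N → ∀ (fuel : Nat) (tot : Int),
      k ≤ fuel → chainAdd φ fuel m tot = chainAdd φ k m tot := by
  intro k
  induction k using Nat.strong_induction_on with
  | _ k ih =>
    intro m hmk hm0 hmN fuel tot hfuel
    by_cases h1 : 1 < m
    · have hk2 : 2 ≤ k := by omega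
      obtain ⟨f', rfl⟩ : ∃ f', fuel = f' + 1 := ⟨fuel - 1, by omega⟩
      obtain ⟨k', rfl⟩ : ∃ k', k = k' + 1 := ⟨k - 1, by omega⟩
      have hmL : m.toNat < φ.length := by omega
      have hφm : PySem.List.pyGetD φ m 0 = φ.getD m.toNat 0 :=
        PySem.List.pyGetD_of_nonneg _ _ hm0
      set y := φ.getD m.toNat 0 with hy
      have hylow : 1 ≤ y := hlow m.toNat hmL (by omega)
      have hyst : y < m := by
        have := hstrict m.toNat hmL (by omega)
        omega
      simp only [chainAdd, if_pos h1, hφm]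
      rw [ih y.toNat (by omega) y rfl (by omega) (by omega) f' (tot + 1) (by omega)]
      rw [ih y.toNat (by omega) y rfl (by omega) (by omega) k' (tot + 1) (by omega)]
    · rw [pv_chainAdd_stop φ _ _ _ h1, pv_chainAdd_stop φ _ _ _ h1]

def pvC (φ : List Int) (m : Int) : Int := chainAdd φ m.toNat m 0

lemma pv_C_rec (φ : List Int) (N : Int)
    (hφlen : φ.length = (N + 1).toNat)
    (hlow : ∀ j : Nat, j < φ.length → 1 ≤ j → 1 ≤ φ.getD j 0)
    (hstrict : ∀ j : Nat, j < φ.length → 2 ≤ (j : Int) → φ.getD j 0 < (j : Int))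
    (m : Int) (h2 : 2 ≤ m) (hmN : m ≤ N) :
    pvC φ m = 1 + pvC φ (φ.getD m.toNat 0) := by
  have hmL : m.toNat < φ.length := by omega
  have hφm : PySem.List.pyGetD φ m 0 = φ.getD m.toNat 0 :=
    PySem.List.pyGetD_of_nonneg _ _ (by omega)
  set y := φ.getD m.toNat 0 with hy
  have hylow : 1 ≤ y := hlow m.toNat hmL (by omega)
  have hyst : y < m := by
    have := hstrict m.toNat hmL (by omega)
    omega
  obtain ⟨k', hk'⟩ : ∃ k', m.toNat = k' + 1 := ⟨m.toNat - 1, by omega⟩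
  unfold pvC
  rw [hk']
  simp only [chainAdd, if_pos (by omega : (1:Int) < m), hφm]
  rw [pv_chainAdd_acc φ k' y (0 + 1)]
  rw [pv_chainAdd_fuel φ N hφlen hlow hstrict y.toNat y rfl (by omega) (by omega) k' 0 (by omega)]
  ring
lemma pv_fphase (N : Int) (φ : List Int)
    (hφlen : φ.length = (N + 1).toNat)
    (hlow : ∀ j : Nat, j < φ.length → 1 ≤ j → 1 ≤ φ.getD j 0)
    (hstrict : ∀ j : Nat, j < φ.length → 2 ≤ (j : Int) → φ.getD j 0 < (j : Int)) :
    ∀ t : Int, 2 ≤ t → t ≤ N + 1 →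
    ((PySem.List.pyRange 2 t 1).foldl (fStep φ) (List.replicate (N + 1).toNat 0)).length
        = (N + 1).toNat ∧
    ∀ j : Nat, j < (N + 1).toNat →
      ((PySem.List.pyRange 2 t 1).foldl (fStep φ) (List.replicate (N + 1).toNat 0)).getD j 0
        = if 2 ≤ (j : Int) ∧ (j : Int) < t then pvC φ (j : Int) else 0 := by
  intro t h2
  induction t, h2 using Int.le_induction with
  | base =>
    intro _
    rw [PySem.List.pyRange_one_eq_nil (le_refl 2)]
    simp only [List.foldl_nil]
    refine ⟨by simp, ?_⟩
    intro j hj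
    rw [if_neg (by omega)]
    simp [List.getD_eq_getElem?_getD, List.getElem?_replicate]
    split <;> rfl
  | succ t h2t ih =>
    intro ht1
    have htN : t ≤ N := by omega
    rw [PySem.List.pyRange_one_succ_right (by omega : (2:Int) ≤ t), List.foldl_append]
    set f := (PySem.List.pyRange 2 t 1).foldl (fStep φ) (List.replicate (N + 1).toNat 0)
      with hf
    obtain ⟨hflen, hfvals⟩ := ih (by omega)
    have ht0 : (0:Int) ≤ t := by omega
    have htL : t.toNat < (N + 1).toNat := by omega
    set φt := φ.getD t.toNat 0 with hφt
    have hφtL : t.toNat < φ.length := by omega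
    have hφt1 : 1 ≤ φt := hlow t.toNat hφtL (by omega)
    have hφtlt : φt < t := by
      have := hstrict t.toNat hφtL (by omega)
      omega
    have hstep : fStep φ f t = f.set t.toNat (1 + f.getD φt.toNat 0) := by
      simp only [fStep, PySem.List.pySetD_of_nonneg _ _ ht0,
        PySem.List.pyGetD_of_nonneg _ _ ht0,
        PySem.List.pyGetD_of_nonneg _ _ (by omega : (0:Int) ≤ φt), ← hφt]
    have hcast : ((φt.toNat : Int)) = φt := by omega
    have hval : 1 + f.getD φt.toNat 0 = pvC φ t := by
      rw [hfvals φt.toNat (by omega), hcast]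
      by_cases hc : 2 ≤ φt
      · rw [if_pos ⟨hc, hφtlt⟩]
        rw [pv_C_rec φ N hφlen hlow hstrict t (by omega) htN, ← hφt]
      · have hφteq : φt = 1 := by omega
        rw [if_neg (by omega)]
        rw [pv_C_rec φ N hφlen hlow hstrict t (by omega) htN, ← hφt, hφteq]
        unfold pvC
        rw [pv_chainAdd_stop φ _ _ _ (by omega : ¬ (1:Int) < 1)]
    simp only [List.foldl_cons, List.foldl_nil, hstep, hval]
    refine ⟨by simp [hflen], ?_⟩
    intro j hj
    rw [pv_getD_set, hflen]
    by_cases hc : t.toNat = j ∧ j < (N + 1).toNat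
    · rw [if_pos hc, if_pos (by omega)]
      have : (j : Int) = t := by omega
      rw [this]
    · rw [if_neg hc, hfvals j hj]
      by_cases hc2 : 2 ≤ (j : Int) ∧ (j : Int) < t
      · rw [if_pos hc2, if_pos (by omega)]
      · rw [if_neg hc2, if_neg (by omega)]

lemma pv_main (N : Int) : solve N = solve_alt N := by
  by_cases hN : 1 ≤ N
  · set φ := totSieve N with hφdef
    have hout : SInv (N + 1).toNat (N + 1) φ := pv_outer N hN (N + 1) (by omega) (le_refl _)
    obtain ⟨hφlen, hφvals⟩ := hout
    have hlow : ∀ j : Nat, j < φ.length → 1 ≤ j → 1 ≤ φ.getD j 0 := by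
      intro j hj
      exact (hφvals j (by omega)).1
    have hstrict : ∀ j : Nat, j < φ.length → 2 ≤ (j : Int) → φ.getD j 0 < (j : Int) := by
      intro j hj h2
      exact (hφvals j (by omega)).2.2 h2 (by omega)
    obtain ⟨hflen, hfvals⟩ := pv_fphase N φ hφlen hlow hstrict (N + 1) (by omega) (le_refl _)
    set f := (PySem.List.pyRange 2 (N + 1) 1).foldl (fStep φ) (List.replicate (N + 1).toNat 0)
      with hfdef
    have hsolve : solve N = (PySem.List.slice f (some 2) none).sum := rfl
    have hsolve' : solve_alt N =
        (PySem.List.pyRange 2 (N + 1) 1).foldl (fun tot n => chainAdd φ n.toNat n tot) 0 := rfl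
    rw [hsolve, hsolve']
    rw [PySem.List.slice_from f (by norm_num : (0:Int) ≤ 2)]
    have hmap : f.drop (2:Int).toNat = (PySem.List.pyRange 2 (N + 1) 1).map (fun n => pvC φ n) := by
      have h2t : ((2:Int)).toNat = 2 := rfl
      rw [h2t]
      apply List.ext_getElem
      · simp only [List.length_drop, List.length_map, PySem.List.length_pyRange_one, hflen]
        omega
      · intro i h1 h2
        rw [List.getElem_drop, List.getElem_map, PySem.List.getElem_pyRange_one]
        have hiL : 2 + i < (N + 1).toNat := by
          simp only [List.length_drop, hflen] at h1
          omega
        rw [← List.getD_eq_getElem f 0 (by omega), hfvals (2 + i) hiL]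
        rw [if_pos (by constructor <;> push_cast <;> omega)]
        push_cast
        ring_nf
    rw [hmap]
    rw [PySem.List.foldl_congr_mem (PySem.List.pyRange 2 (N + 1) 1) _
      (fun tot n => tot + pvC φ n) 0
      (by
        intro acc x _
        exact pv_chainAdd_acc φ x.toNat x acc)]
    rw [PySem.List.foldl_add (PySem.List.pyRange 2 (N + 1) 1) (fun n => pvC φ n) 0]
    simp
  · have hnil : PySem.List.pyRange 2 (N + 1) 1 = [] :=
      PySem.List.pyRange_one_eq_nil (by omega)
    have hsolve : solve N =
        (PySem.List.slice ((PySem.List.pyRange 2 (N + 1) 1).foldl (fStep (totSieve N))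
          (List.replicate (N + 1).toNat 0)) (some 2) none).sum := rfl
    have hsolve' : solve_alt N =
        (PySem.List.pyRange 2 (N + 1) 1).foldl
          (fun tot n => chainAdd (totSieve N) n.toNat n tot) 0 := rfl
    rw [hsolve, hsolve', hnil]
    simp only [List.foldl_nil]
    rw [PySem.List.slice_from _ (by norm_num : (0:Int) ≤ 2)]
    simp [List.drop_replicate]

-- ===== VERDICT (by name: the statement is the Claim_ definition above) =====
theorem solve_spec : Claim_equal_solve := by
  intro N _
  unfold Spec_solve
  exact pv_main N
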